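-- pv_equiv track=rewrite | github.com/Koushal125/Image-Steganography-Tool | steganography.py | modifyPixels
-- ===== SOURCE A (Python) =====
-- def genData(data): # Function to convert encoding data into 8-bit binary form
--     newdata = []
--     for i in data:
--         newdata.append(format(ord(i), "08b"))
--     return newdata
--
-- def modifyPixels(pix, data): # Function for modifying pixels accoding to 8-bit binary data
--     datalist = genData(data)
--     lendata = len(datalist)
--     imgdata = iter(pix)
--
--     for i in range(lendata):
--         pix = [value for value in next(imgdata)[:3] +
--                                 next(imgdata)[:3] +
--                                 next(imgdata)[:3]]
--
--         for j in range(0, 8):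
--             if (datalist[i][j] == '0' and pix[j] % 2 != 0):
--                 pix[j] -= 1
--             elif (datalist[i][j] == '1' and pix[j] % 2 == 0):
--                 if pix[j] != 0:
--                     pix[j] -= 1
--                 else:
--                     pix[j] += 1
--
--         if (i == lendata - 1):
--             if (pix[-1] % 2 == 0):
--                 if pix[-1] != 0:
--                     pix[-1] -= 1
--                 else:
--                     pix[-1] += 1
--         else:
--             if (pix[-1] % 2 != 0):
--                 pix[-1] -= 1
--
--         pix = tuple(pix)
--         yield pix[0:3]
--         yield pix[3:6]
--         yield pix[6:9]
-- ===== SOURCE B (Python) =====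
-- def _fix(v, b):  # parity fix: keep v if its LSB already equals the bit, else step to 0->1 / v->v-1
--     return v if v % 2 == (1 if b == "1" else 0) else (1 if v == 0 else v - 1)
--
-- def modifyPixels(pix, data):  # staged passes: global bitstream -> flatten -> map -> rechunk
--     n = len(data)
--     bits = "".join(format(ord(c), "08b") + ("1" if i == n - 1 else "0")
--                    for i, c in enumerate(data))
--     flat = [v for row in pix[:3 * n] for v in row[:3]]
--     out = [_fix(flat[k], bits[k]) for k in range(9 * n)]
--     while out:
--         yield tuple(out[:3])
--         out = out[3:]
-- ===== Notes on version B (the rewrite author's own statement) =====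
-- stated objective: alternative
-- what changed: B abandons A's per-character loop (three next() calls, an 8-bit inner loop and a separate pix[-1] terminator branch) for staged whole-input passes: it builds one global bitstream (8 bits per char plus a terminator flag), flattens the consumed pixels' first three channels into one list, maps a single arithmetic parity-fix over the 9*len(data) aligned pairs, and rechunks the flat result into triples.
-- outside the precondition, e.g. on modifyPixels([], 'A'): A raises RuntimeError, B raises IndexError
import Mathlib
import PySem

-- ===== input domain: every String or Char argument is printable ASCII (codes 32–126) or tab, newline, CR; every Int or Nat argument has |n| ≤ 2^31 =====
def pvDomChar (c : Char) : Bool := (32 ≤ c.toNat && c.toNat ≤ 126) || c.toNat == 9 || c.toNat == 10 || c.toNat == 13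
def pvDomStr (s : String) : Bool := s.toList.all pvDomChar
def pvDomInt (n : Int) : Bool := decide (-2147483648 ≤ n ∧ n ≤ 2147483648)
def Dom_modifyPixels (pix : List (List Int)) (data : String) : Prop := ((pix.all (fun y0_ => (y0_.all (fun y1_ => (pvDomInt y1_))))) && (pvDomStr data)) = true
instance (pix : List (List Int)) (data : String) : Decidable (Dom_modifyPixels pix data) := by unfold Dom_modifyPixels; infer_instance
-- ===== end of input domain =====

-- B replaces A's per-character loop and separate terminator branch by staged whole-input passes
-- (global bitstream, flattened channels, one zip/map, rechunk into triples); objective: alternative.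

-- shared primitive: format(ord(c), "08b") — the 8 binary digits of a code point below 256
def pvBit (n k : Nat) : Char := if n / 2 ^ k % 2 = 1 then '1' else '0'
def pvBin8 (c : Char) : List Char :=
  [pvBit c.toNat 7, pvBit c.toNat 6, pvBit c.toNat 5, pvBit c.toNat 4,
   pvBit c.toNat 3, pvBit c.toNat 2, pvBit c.toNat 1, pvBit c.toNat 0]

-- ===== PORT A =====
def genData (data : String) : List (List Char) :=
  data.toList.map pvBin8

-- the `for i in range(lendata)` loop; `next(imgdata)` is the head of the not-yet-consumed
-- suffix (Pre_ guarantees it exists); `pix[-1]` is ported as index `length - 1` (exact, since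
-- Pre_ makes the 9-element list nonempty)
def modifyPixelsLoop (datalist : List (List Char)) (lendata : Nat)
    (imgdata : List (List Int)) (i : Nat) : List (List Int) :=
  if _h : i < lendata then
    let r1 := imgdata.getD 0 []
    let r2 := imgdata.getD 1 []
    let r3 := imgdata.getD 2 []
    let bits := datalist.getD i []
    let p1 := (List.range 8).foldl
      (fun (p : List Int) (j : Nat) =>
        if bits.getD j ' ' = '0' ∧ p.getD j 0 % 2 ≠ 0 then p.set j (p.getD j 0 - 1)
        else if bits.getD j ' ' = '1' ∧ p.getD j 0 % 2 = 0 then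
          (if p.getD j 0 ≠ 0 then p.set j (p.getD j 0 - 1) else p.set j (p.getD j 0 + 1))
        else p)
      (r1.take 3 ++ r2.take 3 ++ r3.take 3)
    let p2 :=
      if i = lendata - 1 then
        (if p1.getD (p1.length - 1) 0 % 2 = 0 then
          (if p1.getD (p1.length - 1) 0 ≠ 0 then
            p1.set (p1.length - 1) (p1.getD (p1.length - 1) 0 - 1)
           else p1.set (p1.length - 1) (p1.getD (p1.length - 1) 0 + 1))
         else p1)
      else
        (if p1.getD (p1.length - 1) 0 % 2 ≠ 0 then
          p1.set (p1.length - 1) (p1.getD (p1.length - 1) 0 - 1)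
         else p1)
    p2.take 3 :: (p2.drop 3).take 3 :: (p2.drop 6).take 3 ::
      modifyPixelsLoop datalist lendata (imgdata.drop 3) (i + 1)
  else []
termination_by lendata - i
decreasing_by omega

def modifyPixels (pix : List (List Int)) (data : String) : List (List Int) :=
  let datalist := genData data
  let lendata := datalist.length
  modifyPixelsLoop datalist lendata pix 0

-- ===== PORT B =====
-- Source B's list comprehension body: v if v % 2 == (1 if b == "1" else 0) else (1 if v == 0 else v - 1)
def pvFix (vb : Int × Char) : Int :=
  if vb.1 % 2 = (if vb.2 = '1' then (1 : Int) else 0) then vb.1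
  else if vb.1 = 0 then 1 else vb.1 - 1

-- Source B's final `while out:` rechunking loop
def pvChunk3 (out : List Int) : List (List Int) :=
  match out with
  | [] => []
  | a :: t => (a :: t.take 2) :: pvChunk3 (t.drop 2)
termination_by out.length
decreasing_by simp

def modifyPixels_alt (pix : List (List Int)) (data : String) : List (List Int) :=
  let n := data.toList.length
  let bits := (PySem.List.enumerate data.toList 0).flatMap
      (fun ic => pvBin8 ic.2 ++ [if ic.1 = (n : Int) - 1 then '1' else '0'])
  let flat := (pix.take (3 * n)).flatMap (fun row => row.take 3)
  -- `flat[k]` / `bits[k]`: in range for every k < 9*n under Pre_ (outside it Python raises IndexError)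
  let out := (List.range (9 * n)).map (fun k => pvFix (flat.getD k 0, bits.getD k ' '))
  pvChunk3 out

-- ===== PRECONDITION & SPEC =====
-- Pre_ excludes inputs with fewer than 3*len(data) pixel rows, on which A raises
-- (StopIteration/RuntimeError), and malformed pixel data whose consumed rows have fewer than
-- 3 channels, an unspecified corner where the channel receiving the terminator bit is a
-- defensible choice either way (A: last existing channel; B: the ninth channel, absent there).
def Pre_modifyPixels (pix : List (List Int)) (data : String) : Prop :=
  3 * data.toList.length ≤ pix.length ∧
    ∀ r ∈ pix.take (3 * data.toList.length), 3 ≤ r.length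
instance (pix : List (List Int)) (data : String) : Decidable (Pre_modifyPixels pix data) := by
  unfold Pre_modifyPixels; infer_instance

def pvWitness_modifyPixels : List (List Int) × String :=
  ([[11, 12, 13], [14, 15, 16], [17, 18, 19]], "A")

def Spec_modifyPixels (pix : List (List Int)) (data : String) (out : List (List Int)) : Prop := out = modifyPixels_alt pix data
instance (pix : List (List Int)) (data : String) (out : List (List Int)) : Decidable (Spec_modifyPixels pix data out) := by unfold Spec_modifyPixels; infer_instance

-- ===== CLAIM (what is proved, stated in full; the proofs are below) =====
def Claim_equal_modifyPixels : Prop := ∀ (pix : List (List Int)) (data : String), Dom_modifyPixels pix data → Pre_modifyPixels pix data → Spec_modifyPixels pix data (modifyPixels pix data)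

-- ===== LEMMAS AND PROOFS =====

-- uniform per-channel rule that A's inner loop and tail branch both implement
def aOp (b : Char) (v : Int) : Int :=
  if b = '0' ∧ v % 2 ≠ 0 then v - 1
  else if b = '1' ∧ v % 2 = 0 then (if v ≠ 0 then v - 1 else v + 1) else v

theorem pvBit01 (n k : Nat) : pvBit n k = '0' ∨ pvBit n k = '1' := by
  unfold pvBit; split <;> simp

theorem aOp_eq_pvFix (b : Char) (v : Int) (hb : b = '0' ∨ b = '1') :
    aOp b v = pvFix (v, b) := by
  rcases hb with hb | hb <;> subst hb
  · simp [aOp, pvFix]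
    split_ifs <;> first | rfl | omega
  · simp [aOp, pvFix]
    split_ifs <;> first | rfl | omega

theorem body_eq (bits : List Char) :
    (fun (p : List Int) (j : Nat) =>
      if bits.getD j ' ' = '0' ∧ p.getD j 0 % 2 ≠ 0 then p.set j (p.getD j 0 - 1)
      else if bits.getD j ' ' = '1' ∧ p.getD j 0 % 2 = 0 then
        (if p.getD j 0 ≠ 0 then p.set j (p.getD j 0 - 1) else p.set j (p.getD j 0 + 1))
      else p)
    = fun (p : List Int) (j : Nat) => p.set j (aOp (bits.getD j ' ') (p.getD j 0)) := by
  funext p j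
  unfold aOp
  by_cases h : j < p.length
  · split_ifs <;> first
      | rfl
      | (rw [List.getD_eq_getElem p 0 h]; exact (List.set_getElem_self h).symm)
  · split_ifs <;> simp [List.set_eq_of_length_le (by omega : p.length ≤ j)]

theorem fold9 (b0 b1 b2 b3 b4 b5 b6 b7 : Char) (a0 a1 a2 a3 a4 a5 a6 a7 a8 : Int) :
    (List.range 8).foldl
      (fun (p : List Int) (j : Nat) =>
        p.set j (aOp ([b0, b1, b2, b3, b4, b5, b6, b7].getD j ' ') (p.getD j 0)))
      [a0, a1, a2, a3, a4, a5, a6, a7, a8]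
    = [aOp b0 a0, aOp b1 a1, aOp b2 a2, aOp b3 a3, aOp b4 a4, aOp b5 a5, aOp b6 a6,
       aOp b7 a7, a8] := by
  simp [List.range_succ, List.getD]

theorem ex3 (r : List Int) (h : 3 ≤ r.length) : ∃ x y z t, r = x :: y :: z :: t := by
  match r, h with
  | x :: y :: z :: t, _ => exact ⟨x, y, z, t, rfl⟩

theorem chunk3_cons9 (a0 a1 a2 a3 a4 a5 a6 a7 a8 : Int) (l : List Int) :
    pvChunk3 (a0 :: a1 :: a2 :: a3 :: a4 :: a5 :: a6 :: a7 :: a8 :: l)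
    = [a0, a1, a2] :: [a3, a4, a5] :: [a6, a7, a8] :: pvChunk3 l := by
  simp [pvChunk3]

theorem zipmap9 (x1 y1 z1 x2 y2 z2 x3 y3 z3 : Int) (rest : List Int)
    (b0 b1 b2 b3 b4 b5 b6 b7 b8 : Char) (brest : List Char) :
    (((x1 :: y1 :: z1 :: x2 :: y2 :: z2 :: x3 :: y3 :: z3 :: rest)).zip
        (b0 :: b1 :: b2 :: b3 :: b4 :: b5 :: b6 :: b7 :: b8 :: brest)).map pvFix
    = pvFix (x1, b0) :: pvFix (y1, b1) :: pvFix (z1, b2) :: pvFix (x2, b3) :: pvFix (y2, b4)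
      :: pvFix (z2, b5) :: pvFix (x3, b6) :: pvFix (y3, b7) :: pvFix (z3, b8)
      :: (rest.zip brest).map pvFix := rfl

theorem tailLast (v0 v1 v2 v3 v4 v5 v6 v7 v8 : Int) :
    (if ([v0,v1,v2,v3,v4,v5,v6,v7,v8] : List Int).getD
          (([v0,v1,v2,v3,v4,v5,v6,v7,v8] : List Int).length - 1) 0 % 2 = 0 then
       (if ([v0,v1,v2,v3,v4,v5,v6,v7,v8] : List Int).getD
              (([v0,v1,v2,v3,v4,v5,v6,v7,v8] : List Int).length - 1) 0 ≠ 0 then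
          ([v0,v1,v2,v3,v4,v5,v6,v7,v8] : List Int).set
            (([v0,v1,v2,v3,v4,v5,v6,v7,v8] : List Int).length - 1)
            (([v0,v1,v2,v3,v4,v5,v6,v7,v8] : List Int).getD
              (([v0,v1,v2,v3,v4,v5,v6,v7,v8] : List Int).length - 1) 0 - 1)
        else
          ([v0,v1,v2,v3,v4,v5,v6,v7,v8] : List Int).set
            (([v0,v1,v2,v3,v4,v5,v6,v7,v8] : List Int).length - 1)
            (([v0,v1,v2,v3,v4,v5,v6,v7,v8] : List Int).getD
              (([v0,v1,v2,v3,v4,v5,v6,v7,v8] : List Int).length - 1) 0 + 1))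
     else [v0,v1,v2,v3,v4,v5,v6,v7,v8])
    = [v0,v1,v2,v3,v4,v5,v6,v7, aOp '1' v8] := by
  simp only [List.length_cons, List.length_nil, List.getD, aOp]
  norm_num
  split_ifs <;> simp_all

theorem tailNotLast (v0 v1 v2 v3 v4 v5 v6 v7 v8 : Int) :
    (if ([v0,v1,v2,v3,v4,v5,v6,v7,v8] : List Int).getD
          (([v0,v1,v2,v3,v4,v5,v6,v7,v8] : List Int).length - 1) 0 % 2 ≠ 0 then
       ([v0,v1,v2,v3,v4,v5,v6,v7,v8] : List Int).set
         (([v0,v1,v2,v3,v4,v5,v6,v7,v8] : List Int).length - 1)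
         (([v0,v1,v2,v3,v4,v5,v6,v7,v8] : List Int).getD
           (([v0,v1,v2,v3,v4,v5,v6,v7,v8] : List Int).length - 1) 0 - 1)
     else [v0,v1,v2,v3,v4,v5,v6,v7,v8])
    = [v0,v1,v2,v3,v4,v5,v6,v7, aOp '0' v8] := by
  simp only [List.length_cons, List.length_nil, List.getD, aOp]
  norm_num
  split_ifs <;> simp_all

-- B's staged pipeline, restricted to the suffix of the data starting at index i
def altSuffix (pix : List (List Int)) (n : Nat) (cs : List Char) (i : Nat) : List (List Int) :=
  let bits := (PySem.List.enumerate cs (i : Int)).flatMap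
      (fun ic => pvBin8 ic.2 ++ [if ic.1 = (n : Int) - 1 then '1' else '0'])
  let flat := ((pix.drop (3 * i)).take (3 * cs.length)).flatMap (fun row => row.take 3)
  pvChunk3 ((flat.zip bits).map pvFix)

theorem loop_eq (L : List Char) (pix : List (List Int))
    (hlen : 3 * L.length ≤ pix.length)
    (hrows : ∀ r ∈ pix.take (3 * L.length), 3 ≤ r.length) :
    ∀ (cs : List Char) (i : Nat), L.drop i = cs → i + cs.length = L.length →
      modifyPixelsLoop (L.map pvBin8) L.length (pix.drop (3 * i)) i
      = altSuffix pix L.length cs i := by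
  intro cs
  induction cs with
  | nil =>
    intro i hdrop hcount
    simp only [List.length_nil] at hcount
    rw [modifyPixelsLoop]
    simp [altSuffix, PySem.List.enumerate, pvChunk3, show ¬ i < L.length by omega]
  | cons c cs ih =>
    intro i hdrop hcount
    simp only [List.length_cons] at hcount
    have hi : i < L.length := by omega
    have hLi : L[i]? = some c := by
      have h0 : (L.drop i)[0]? = some c := by rw [hdrop]; rfl
      rw [List.getElem?_drop] at h0; simpa using h0
    have hrow3 : ∀ k : Nat, k < 3 → ∃ x y z t, pix[3 * i + k]? = some (x :: y :: z :: t) := by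
      intro k hk
      have hb : 3 * i + k < pix.length := by omega
      have hlt : 3 * i + k < (pix.take (3 * L.length)).length := by
        simp only [List.length_take]; omega
      have hmem : pix[3 * i + k] ∈ pix.take (3 * L.length) := by
        have := List.getElem_mem hlt
        simpa [List.getElem_take] using this
      obtain ⟨x, y, z, t, h⟩ := ex3 _ (hrows _ hmem)
      exact ⟨x, y, z, t, by rw [List.getElem?_eq_getElem hb, h]⟩
    obtain ⟨x1, y1, z1, t1, e1⟩ := hrow3 0 (by omega)
    obtain ⟨x2, y2, z2, t2, e2⟩ := hrow3 1 (by omega)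
    obtain ⟨x3, y3, z3, t3, e3⟩ := hrow3 2 (by omega)
    rw [Nat.add_zero] at e1
    have hbits : (L.map pvBin8).getD i [] = pvBin8 c := by
      simp [List.getD, List.getElem?_map, hLi]
    have hr1 : (pix.drop (3 * i)).getD 0 [] = x1 :: y1 :: z1 :: t1 := by
      simp [List.getD, List.getElem?_drop, e1]
    have hr2 : (pix.drop (3 * i)).getD 1 [] = x2 :: y2 :: z2 :: t2 := by
      simp [List.getD, List.getElem?_drop, e2]
    have hr3 : (pix.drop (3 * i)).getD 2 [] = x3 :: y3 :: z3 :: t3 := by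
      simp [List.getD, List.getElem?_drop, e3]
    have hp0 : ((pix.drop (3 * i)).getD 0 []).take 3 ++ ((pix.drop (3 * i)).getD 1 []).take 3 ++
        ((pix.drop (3 * i)).getD 2 []).take 3
        = [x1, y1, z1, x2, y2, z2, x3, y3, z3] := by
      rw [hr1, hr2, hr3]; rfl
    have hdd : (pix.drop (3 * i)).drop 3 = pix.drop (3 * (i + 1)) := by
      rw [List.drop_drop]; congr 1
    have hflat : (pix.drop (3 * i)).take (3 * (c :: cs).length)
        = (x1 :: y1 :: z1 :: t1) :: (x2 :: y2 :: z2 :: t2) :: (x3 :: y3 :: z3 :: t3) ::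
          (pix.drop (3 * (i + 1))).take (3 * cs.length) := by
      have h3 : pix.drop (3 * i) = (x1 :: y1 :: z1 :: t1) :: (x2 :: y2 :: z2 :: t2) ::
          (x3 :: y3 :: z3 :: t3) :: pix.drop (3 * (i + 1)) := by
        apply List.ext_getElem?
        intro j
        match j with
        | 0 => simp only [List.getElem?_drop]; simpa using e1
        | 1 => simp only [List.getElem?_drop]; simpa using e2
        | 2 => simp only [List.getElem?_drop]; simpa using e3
        | (k+3) =>
          simp only [List.getElem?_drop, List.getElem?_cons_succ]
          congr 1; omega
      rw [h3]
      simp only [List.length_cons]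
      rw [show 3 * (cs.length + 1) = 3 * cs.length + 3 by ring]
      rfl
    have hih := ih (i + 1) (by rw [← List.drop_drop, hdrop]; rfl) (by omega)
    rw [modifyPixelsLoop]
    rw [dif_pos hi]
    simp only [body_eq, hbits, hp0, hdd, hih]
    unfold altSuffix
    rw [PySem.List.enumerate_cons, List.flatMap_cons, hflat]
    simp only [List.flatMap_cons, List.take_succ_cons, List.take_zero]
    have hterm : ((i : Int) = (L.length : Int) - 1) ↔ (i = L.length - 1) := by omega
    simp only [hterm, pvBin8, List.cons_append, List.nil_append]
    rw [fold9]
    by_cases hlast : i = L.length - 1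
    · rw [if_pos hlast, if_pos hlast, tailLast, zipmap9, chunk3_cons9]
      rw [← aOp_eq_pvFix _ _ (pvBit01 _ _), ← aOp_eq_pvFix _ _ (pvBit01 _ _),
          ← aOp_eq_pvFix _ _ (pvBit01 _ _), ← aOp_eq_pvFix _ _ (pvBit01 _ _),
          ← aOp_eq_pvFix _ _ (pvBit01 _ _), ← aOp_eq_pvFix _ _ (pvBit01 _ _),
          ← aOp_eq_pvFix _ _ (pvBit01 _ _), ← aOp_eq_pvFix _ _ (pvBit01 _ _),
          ← aOp_eq_pvFix _ _ (Or.inr rfl)]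
      rfl
    · rw [if_neg hlast, if_neg hlast, tailNotLast, zipmap9, chunk3_cons9]
      rw [← aOp_eq_pvFix _ _ (pvBit01 _ _), ← aOp_eq_pvFix _ _ (pvBit01 _ _),
          ← aOp_eq_pvFix _ _ (pvBit01 _ _), ← aOp_eq_pvFix _ _ (pvBit01 _ _),
          ← aOp_eq_pvFix _ _ (pvBit01 _ _), ← aOp_eq_pvFix _ _ (pvBit01 _ _),
          ← aOp_eq_pvFix _ _ (pvBit01 _ _), ← aOp_eq_pvFix _ _ (pvBit01 _ _),
          ← aOp_eq_pvFix _ _ (Or.inl rfl)]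
      rfl

-- under Pre_, the 9*n index loop of B is the zip of the two equal-length streams
theorem range_map_eq_zip (xs : List Int) (bs : List Char) (h : xs.length = bs.length) :
    (List.range xs.length).map (fun k => pvFix (xs.getD k 0, bs.getD k ' '))
    = (xs.zip bs).map pvFix := by
  induction xs generalizing bs with
  | nil => simp
  | cons x xs ih =>
    cases bs with
    | nil => simp at h
    | cons b bs =>
      simp only [List.length_cons, List.range_succ_eq_map, List.map_cons, List.map_map,
        List.zip_cons_cons, List.getD_cons_zero]
      refine congrArg₂ _ rfl ?_
      have hc : (fun k => pvFix ((x :: xs).getD k 0, (b :: bs).getD k ' ')) ∘ Nat.succ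
          = fun k => pvFix (xs.getD k 0, bs.getD k ' ') := by
        funext k; simp
      rw [hc, ih bs (by simpa using h)]

theorem flatMap_take3_length (l : List (List Int)) (h : ∀ r ∈ l, 3 ≤ r.length) :
    (l.flatMap (fun r => r.take 3)).length = 3 * l.length := by
  induction l with
  | nil => simp
  | cons r t ih =>
    simp only [List.flatMap_cons, List.length_append, List.length_take, List.length_cons]
    rw [ih (fun r hr => h r (List.mem_cons_of_mem _ hr))]
    have := h r (List.mem_cons_self)
    omega

theorem bits_length (cs : List Char) (n : Nat) : ∀ i : Int,
    ((PySem.List.enumerate cs i).flatMap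
      (fun ic => pvBin8 ic.2 ++ [if ic.1 = (n : Int) - 1 then '1' else '0'])).length
    = 9 * cs.length := by
  induction cs with
  | nil => intro i; simp [PySem.List.enumerate]
  | cons c t ih =>
    intro i
    rw [PySem.List.enumerate_cons, List.flatMap_cons, List.length_append, ih]
    simp [pvBin8]; ring

-- ===== VERDICT (by name: the statement is the Claim_ definition above) =====
theorem modifyPixels_spec : Claim_equal_modifyPixels := by
  intro pix data _hdom hpre
  obtain ⟨h1, h2⟩ := hpre
  unfold Spec_modifyPixels modifyPixels modifyPixels_alt genData
  dsimp only
  have h := loop_eq data.toList pix h1 h2 data.toList 0 rfl (by simp)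
  have hfl : ((pix.take (3 * data.toList.length)).flatMap (fun row => row.take 3)).length
      = 9 * data.toList.length := by
    rw [flatMap_take3_length _ h2, List.length_take]
    omega
  have hbl := bits_length data.toList data.toList.length 0
  rw [show (9 * data.toList.length)
      = ((pix.take (3 * data.toList.length)).flatMap (fun row => row.take 3)).length
      from hfl.symm]
  rw [range_map_eq_zip _ _ (by rw [hfl, hbl])]
  simpa [altSuffix] using h
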